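-- pv_equiv track=rewrite | github.com/pgfoster/p4-phylogenetics | p4/func.py | nUnrootedTrees
-- ===== SOURCE A (Python) =====
-- def nUnrootedTrees(nTaxa):
--     upper = (nTaxa * 2) - 5
--     nTrees = 1
--     i = 3
--     while i <= upper:
--         nTrees *= i
--         i += 2
--     return nTrees
-- ===== SOURCE B (Python) =====
-- def nUnrootedTrees(nTaxa):
--     # Closed form: (2n-5)!! = (2n-4)! / (2^(n-2) * (n-2)!)
--     if nTaxa < 4:
--         return 1
--     f = 1
--     for k in range(2, 2 * nTaxa - 3):
--         f *= k                      # f = (2*nTaxa - 4)!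
--     g = 1
--     for k in range(2, nTaxa - 1):
--         g *= k                      # g = (nTaxa - 2)!
--     return f // (2 ** (nTaxa - 2) * g)
-- ===== Notes on version B (the rewrite author's own statement) =====
-- stated objective: alternative
-- what changed: Replaces the odd-number while-loop product (the double factorial (2n-5)!! computed by stepping i by 2) with the closed-form identity (2n-5)!! = (2n-4)!/(2^(n-2)*(n-2)!), computed from two factorials and one exact integer division.
import Mathlib
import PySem

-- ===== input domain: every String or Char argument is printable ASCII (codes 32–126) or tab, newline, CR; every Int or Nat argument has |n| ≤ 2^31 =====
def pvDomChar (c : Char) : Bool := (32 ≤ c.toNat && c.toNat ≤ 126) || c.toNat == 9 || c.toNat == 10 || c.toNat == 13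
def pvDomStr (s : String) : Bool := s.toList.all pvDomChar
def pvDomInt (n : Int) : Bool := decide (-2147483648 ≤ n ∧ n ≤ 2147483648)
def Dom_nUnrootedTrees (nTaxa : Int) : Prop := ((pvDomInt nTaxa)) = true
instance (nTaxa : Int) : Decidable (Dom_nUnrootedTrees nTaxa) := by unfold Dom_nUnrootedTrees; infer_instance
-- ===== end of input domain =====

-- B computes the double factorial (2n-5)!! via the closed-form identity
-- (2n-5)!! = (2n-4)! / (2^(n-2)·(n-2)!) instead of A's step-by-2 odd-number loop.

-- ===== PORT A =====
-- while i <= upper: nTrees *= i; i += 2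
def nUnrootedTreesLoop (upper nTrees i : Int) : Int :=
  if i ≤ upper then nUnrootedTreesLoop upper (nTrees * i) (i + 2) else nTrees
termination_by (upper + 1 - i).toNat
decreasing_by omega

def nUnrootedTrees (nTaxa : Int) : Int :=
  nUnrootedTreesLoop (nTaxa * 2 - 5) 1 3

-- ===== PORT B =====
def nUnrootedTrees_alt (nTaxa : Int) : Int :=
  if nTaxa < 4 then 1
  else
    -- f = (2*nTaxa - 4)!  accumulated over range(2, 2*nTaxa - 3)
    let f := (PySem.List.pyRange 2 (2 * nTaxa - 3) 1).foldl (· * ·) 1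
    -- g = (nTaxa - 2)!    accumulated over range(2, nTaxa - 1)
    let g := (PySem.List.pyRange 2 (nTaxa - 1) 1).foldl (· * ·) 1
    PySem.Int.floordiv f (2 ^ (nTaxa - 2).toNat * g)

-- ===== PRECONDITION & SPEC =====
def Spec_nUnrootedTrees (nTaxa : Int) (out : Int) : Prop := out = nUnrootedTrees_alt nTaxa
instance (nTaxa : Int) (out : Int) : Decidable (Spec_nUnrootedTrees nTaxa out) := by unfold Spec_nUnrootedTrees; infer_instance

-- ===== CLAIM (what is proved, stated in full; the proofs are below) =====
def Claim_equal_nUnrootedTrees : Prop := ∀ (nTaxa : Int), Dom_nUnrootedTrees nTaxa → Spec_nUnrootedTrees nTaxa (nUnrootedTrees nTaxa)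

-- ===== LEMMAS AND PROOFS =====

-- 1·3·5⋯(2m-1), the value both programs compute for nTaxa = m + 2
def oddprod : ℕ → ℤ
  | 0 => 1
  | m + 1 => oddprod m * (2 * m + 1)

lemma loop_mul : ∀ (k : ℕ) (u t i : Int), (u + 1 - i).toNat ≤ k →
    nUnrootedTreesLoop u t i = t * nUnrootedTreesLoop u 1 i := by
  intro k
  induction k with
  | zero =>
    intro u t i h
    rw [nUnrootedTreesLoop.eq_def]
    conv_rhs => rw [nUnrootedTreesLoop.eq_def]
    rw [if_neg (by omega : ¬ i ≤ u), if_neg (by omega : ¬ i ≤ u)]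
    ring
  | succ k ih =>
    intro u t i h
    by_cases hle : i ≤ u
    · rw [nUnrootedTreesLoop.eq_def]
      conv_rhs => rw [nUnrootedTreesLoop.eq_def]
      rw [if_pos hle, if_pos hle]
      rw [ih u (t * i) (i + 2) (by omega), ih u (1 * i) (i + 2) (by omega)]
      ring
    · rw [nUnrootedTreesLoop.eq_def]
      conv_rhs => rw [nUnrootedTreesLoop.eq_def]
      rw [if_neg hle, if_neg hle]
      ring

lemma loop_peel : ∀ (k : ℕ) (u i : Int), i ≤ u → (u - i).toNat = 2 * k →
    nUnrootedTreesLoop u 1 i = nUnrootedTreesLoop (u - 2) 1 i * u := by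
  intro k
  induction k with
  | zero =>
    intro u i hle h
    have hui : u = i := by omega
    conv_lhs => rw [nUnrootedTreesLoop.eq_def]
    rw [if_pos hle]
    conv_lhs => rw [nUnrootedTreesLoop.eq_def]
    rw [if_neg (by omega : ¬ i + 2 ≤ u)]
    conv_rhs => rw [nUnrootedTreesLoop.eq_def]
    rw [if_neg (by omega : ¬ i ≤ u - 2)]
    omega
  | succ k ih =>
    intro u i hle h
    have h2 : i + 2 ≤ u := by omega
    rw [nUnrootedTreesLoop.eq_def, if_pos hle]
    conv_rhs => rw [nUnrootedTreesLoop.eq_def]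
    rw [if_pos (by omega : i ≤ u - 2)]
    rw [loop_mul ((u + 1 - (i + 2)).toNat) u (1 * i) (i + 2) le_rfl,
        loop_mul ((u - 2 + 1 - (i + 2)).toNat) (u - 2) (1 * i) (i + 2) le_rfl]
    rw [ih u (i + 2) h2 (by omega)]
    ring

lemma A_closed : ∀ m : ℕ, nUnrootedTreesLoop (2 * (m : ℤ) - 1) 1 3 = oddprod m := by
  intro m
  induction m with
  | zero =>
    rw [nUnrootedTreesLoop.eq_def, if_neg (by omega), oddprod]
  | succ m ih =>
    rcases Nat.eq_zero_or_pos m with hm | hm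
    · subst hm
      rw [nUnrootedTreesLoop.eq_def, if_neg (by omega)]
      simp [oddprod]
    · have h3 : (3 : ℤ) ≤ 2 * (↑(m + 1) : ℤ) - 1 := by push_cast; omega
      have := loop_peel (m - 1) (2 * (↑(m + 1) : ℤ) - 1) 3 h3 (by push_cast; omega)
      rw [this]
      have hsub : (2 * (↑(m + 1) : ℤ) - 1) - 2 = 2 * (m : ℤ) - 1 := by push_cast; ring
      rw [hsub, ih, oddprod]
      push_cast
      ring

lemma foldl_mul_shift : ∀ (l : List Int) (x : Int),
    l.foldl (· * ·) x = x * l.foldl (· * ·) 1 := by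
  intro l
  induction l with
  | nil => intro x; simp
  | cons a l ih =>
    intro x
    simp only [List.foldl_cons]
    rw [ih (x * a), ih (1 * a)]
    ring

lemma factprod : ∀ j : ℕ, (PySem.List.pyRange 2 ((j : ℤ) + 2) 1).foldl (· * ·) 1
    = ((j + 1).factorial : ℤ) := by
  intro j
  induction j with
  | zero =>
    rw [show ((0 : ℕ) : ℤ) + 2 = 2 by norm_num, PySem.List.pyRange_one_eq_nil (by omega)]
    simp [Nat.factorial]
  | succ j ih =>
    have : ((j + 1 : ℕ) : ℤ) + 2 = ((j : ℤ) + 2) + 1 := by push_cast; ring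
    rw [this, PySem.List.pyRange_one_succ_right (by omega)]
    rw [List.foldl_append]
    simp only [List.foldl_cons, List.foldl_nil]
    rw [foldl_mul_shift, ih]
    have h2 : (((j + 1) + 1).factorial : ℤ) = ((j : ℤ) + 2) * ((j + 1).factorial : ℤ) := by
      rw [Nat.factorial_succ]; push_cast; ring
    rw [h2]
    ring

lemma doubfact_identity : ∀ m : ℕ, ((2 * m).factorial : ℤ)
    = 2 ^ m * (m.factorial : ℤ) * oddprod m := by
  intro m
  induction m with
  | zero => simp [oddprod, Nat.factorial]
  | succ m ih =>
    have h : 2 * (m + 1) = (2 * m + 1) + 1 := by ring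
    rw [h, Nat.factorial_succ, Nat.factorial_succ, Nat.factorial_succ, oddprod]
    push_cast
    rw [ih]
    ring

-- ===== VERDICT (by name: the statement is the Claim_ definition above) =====
theorem nUnrootedTrees_spec : Claim_equal_nUnrootedTrees := by
  intro n _
  unfold Spec_nUnrootedTrees nUnrootedTrees nUnrootedTrees_alt
  by_cases h4 : n < 4
  · rw [if_pos h4]
    rw [nUnrootedTreesLoop.eq_def, if_neg (by omega)]
  · rw [if_neg h4]
    rw [not_lt] at h4
    set m : ℕ := (n - 2).toNat with hm
    have hmn : (m : ℤ) = n - 2 := by omega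
    have hm2 : 2 ≤ m := by omega
    -- A-side: upper = 2n - 5 = 2m - 1
    have hupper : n * 2 - 5 = 2 * (m : ℤ) - 1 := by omega
    rw [hupper, A_closed m]
    -- B-side f : range bound 2n - 3 = (2m - 1) + 2
    have hf : 2 * n - 3 = ((2 * m - 1 : ℕ) : ℤ) + 2 := by
      push_cast [Nat.cast_sub (by omega : 1 ≤ 2 * m)]; omega
    have hg : n - 1 = ((m - 1 : ℕ) : ℤ) + 2 := by
      push_cast [Nat.cast_sub (by omega : 1 ≤ m)]; omega
    rw [hf, hg, factprod, factprod]
    have h1 : (2 * m - 1) + 1 = 2 * m := by omega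
    have h2 : (m - 1) + 1 = m := by omega
    rw [h1, h2, doubfact_identity m]
    have hd : (0 : ℤ) < 2 ^ (n - 2).toNat * (m.factorial : ℤ) := by
      apply mul_pos
      · positivity
      · exact_mod_cast m.factorial_pos
    rw [PySem.Int.floordiv_eq_ediv_of_pos hd, ← hm]
    rw [Int.mul_ediv_cancel_left _ (by positivity)]
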